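-- pv_equiv track=rewrite | github.com/guillaume-cuenca/runtrack-python | Jour 4/Job 9/valeurs_maximum_et_minimum.py | recuperer_info_liste
-- ===== SOURCE A (Python) =====
-- def recuperer_info_liste(liste):
--     if not liste:  # Vérifier si la liste est vide
--         return None, None, None
--
--     valeur = liste[0]
--     maximum = minimum = valeur
--
--     for nombre in liste[1:]:
--         if nombre > maximum:
--             maximum = nombre
--         elif nombre < minimum:
--             minimum = nombre
--
--     return valeur, maximum, minimum
-- ===== SOURCE B (Python) =====
-- def recuperer_info_liste(liste):
--     if not liste:
--         return None, None, None
--     return liste[0], max(liste), min(liste)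
-- ===== Notes on version B (the rewrite author's own statement) =====
-- stated objective: simpler
-- what changed: Replaced the single fused loop carrying a (max,min) pair by an index lookup plus the two builtin reductions max(liste) and min(liste), three independent scans.
import Mathlib
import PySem

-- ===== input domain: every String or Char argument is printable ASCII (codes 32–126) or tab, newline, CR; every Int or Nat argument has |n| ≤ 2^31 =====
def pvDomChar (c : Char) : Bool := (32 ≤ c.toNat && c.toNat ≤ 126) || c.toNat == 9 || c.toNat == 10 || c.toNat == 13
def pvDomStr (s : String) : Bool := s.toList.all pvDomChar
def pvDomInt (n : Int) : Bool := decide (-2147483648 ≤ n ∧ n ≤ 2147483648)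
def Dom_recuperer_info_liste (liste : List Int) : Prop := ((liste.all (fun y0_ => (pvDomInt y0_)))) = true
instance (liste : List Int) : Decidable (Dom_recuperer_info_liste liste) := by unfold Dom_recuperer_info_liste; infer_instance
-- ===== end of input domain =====

-- B replaces A's fused max/min loop by liste[0], max(liste), min(liste): simpler, three independent scans.

-- ===== PORT A =====
def recuperer_info_liste (liste : List Int) : Option Int × Option Int × Option Int :=
  match liste with
  | [] => (none, none, none)
  | valeur :: _ =>
    let st := (PySem.List.slice liste (some 1) none).foldl
      (fun (p : Int × Int) nombre =>
        if nombre > p.1 then (nombre, p.2)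
        else if nombre < p.2 then (p.1, nombre)
        else p) (valeur, valeur)
    (some valeur, some st.1, some st.2)

-- ===== PORT B =====
def recuperer_info_liste_alt (liste : List Int) : Option Int × Option Int × Option Int :=
  match liste with
  | [] => (none, none, none)
  | valeur :: _ =>
    (some valeur, PySem.List.max? liste (fun y => y), PySem.List.min? liste (fun y => y))

-- ===== PRECONDITION & SPEC =====
def Spec_recuperer_info_liste (liste : List Int) (out : Option Int × Option Int × Option Int) : Prop := out = recuperer_info_liste_alt liste
instance (liste : List Int) (out : Option Int × Option Int × Option Int) : Decidable (Spec_recuperer_info_liste liste out) := by unfold Spec_recuperer_info_liste; infer_instance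

-- ===== CLAIM (what is proved, stated in full; the proofs are below) =====
def Claim_equal_recuperer_info_liste : Prop := ∀ (liste : List Int), Dom_recuperer_info_liste liste → Spec_recuperer_info_liste liste (recuperer_info_liste liste)

-- ===== LEMMAS AND PROOFS =====

-- A's fused loop equals the pair of running-max / running-min folds, given min-seed ≤ max-seed.
theorem pv_fold_pair (l : List Int) : ∀ (a b : Int), b ≤ a →
    l.foldl (fun (p : Int × Int) nombre =>
        if nombre > p.1 then (nombre, p.2)
        else if nombre < p.2 then (p.1, nombre)
        else p) (a, b) = (l.foldl max a, l.foldl min b) := by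
  induction l with
  | nil => intro a b _; rfl
  | cons n t ih =>
    intro a b hba
    simp only [List.foldl]
    by_cases h1 : n > a
    · simp only [if_pos h1]
      have hmax : max a n = n := by omega
      have hmin : min b n = b := by omega
      rw [hmax, hmin]; exact ih n b (by omega)
    · simp only [if_neg h1]
      by_cases h2 : n < b
      · simp only [if_pos h2]
        have hmax : max a n = a := by omega
        have hmin : min b n = n := by omega
        rw [hmax, hmin]; exact ih a n (by omega)
      · simp only [if_neg h2]
        have hmax : max a n = a := by omega
        have hmin : min b n = b := by omega
        rw [hmax, hmin]; exact ih a b hba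

-- ===== VERDICT (by name: the statement is the Claim_ definition above) =====
theorem recuperer_info_liste_spec : Claim_equal_recuperer_info_liste := by
  intro liste _
  unfold Spec_recuperer_info_liste recuperer_info_liste recuperer_info_liste_alt
  match liste with
  | [] => rfl
  | v :: t =>
    simp only [PySem.List.slice_from_one, List.tail_cons,
      PySem.List.max?_id_cons, PySem.List.min?_id_cons,
      pv_fold_pair t v v (le_refl v)]
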